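-- pv_equiv track=rewrite | github.com/btpozolo/PY110 | Problems/easy5.py | staggered_case
-- ===== SOURCE A (Python) =====
-- def staggered_case(sentence):
--     cap = True
--     new_str = ''
--     for char in sentence:
--         if char.isalpha():
--             if cap:
--                 new_str += char.upper()
--             else:
--                 new_str += char.lower()
--         else:
--             new_str += char
--         cap = not cap
--     return new_str
-- ===== SOURCE B (Python) =====
-- def staggered_case(sentence):
--     # Consume the string two characters at a time: uppercase the first of each
--     # pair, lowercase the second, using string-level slice upper/lower.
--     # No per-character case toggle and no isalpha test are needed, since
--     # str.upper/str.lower leave non-alphabetic characters unchanged.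
--     parts = []
--     for j in range(0, len(sentence), 2):
--         pair = sentence[j:j+2]
--         parts.append(pair[:1].upper() + pair[1:].lower())
--     return ''.join(parts)
-- ===== Notes on version B (the rewrite author's own statement) =====
-- stated objective: alternative
-- what changed: B consumes the string in two-character slices (upper the first, lower the second of each pair via string-level upper/lower, which are identity on non-letters), eliminating A's per-character case toggle and isalpha branching entirely.
import Mathlib
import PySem

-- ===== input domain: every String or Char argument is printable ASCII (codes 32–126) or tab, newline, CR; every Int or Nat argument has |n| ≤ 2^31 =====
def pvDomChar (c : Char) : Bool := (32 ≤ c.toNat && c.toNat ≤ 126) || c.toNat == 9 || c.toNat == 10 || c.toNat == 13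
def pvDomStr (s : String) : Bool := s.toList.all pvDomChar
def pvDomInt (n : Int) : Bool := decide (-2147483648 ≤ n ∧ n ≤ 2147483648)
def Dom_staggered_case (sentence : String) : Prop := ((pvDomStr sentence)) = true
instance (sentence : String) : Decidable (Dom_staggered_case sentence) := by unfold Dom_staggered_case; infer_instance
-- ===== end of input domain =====

-- B consumes the string in two-character slices (upper the first, lower the second of
-- each pair), with no per-character case toggle and no isalpha branching; same return value.

-- ===== PORT A =====
-- A's loop: carries the toggle `cap` and the growing string `new_str`, flipping `cap` each step.
def staggeredLoopA : List Char → Bool → List Char → List Char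
  | [], _, acc => acc
  | c :: cs, cap, acc =>
      staggeredLoopA cs (!cap)
        (acc ++ [if PySem.Chars.isalpha c then
                   (if cap then PySem.Chars.upperChar c else PySem.Chars.lowerChar c)
                 else c])

def staggered_case (sentence : String) : String :=
  String.ofList (staggeredLoopA sentence.toList true [])

-- ===== PORT B =====
-- B's loop over range(0, len, 2): each iteration takes pair = sentence[j:j+2] and appends
-- pair[:1].upper() + pair[1:].lower(); transcribed as two-at-a-time recursion (exact: the
-- iteration at j consumes precisely characters j and j+1, i.e. the next two of the rest).
def staggeredLoopB : List Char → List (List Char)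
  | [] => []
  | [c] => [PySem.Chars.upper [c] ++ PySem.Chars.lower []]
  | c :: d :: ds => (PySem.Chars.upper [c] ++ PySem.Chars.lower [d]) :: staggeredLoopB ds

def staggered_case_alt (sentence : String) : String :=
  String.ofList (List.flatten (staggeredLoopB sentence.toList))

-- ===== PRECONDITION & SPEC =====
def Spec_staggered_case (sentence : String) (out : String) : Prop := out = staggered_case_alt sentence
instance (sentence : String) (out : String) : Decidable (Spec_staggered_case sentence out) := by unfold Spec_staggered_case; infer_instance

-- ===== CLAIM (what is proved, stated in full; the proofs are below) =====
def Claim_equal_staggered_case : Prop := ∀ (sentence : String), Dom_staggered_case sentence → Spec_staggered_case sentence (staggered_case sentence)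

-- ===== LEMMAS AND PROOFS =====

-- A's per-character step without the isalpha test: upperChar/lowerChar are
-- the identity on non-alphabetic characters.
theorem pv_step_eq (cap : Bool) (c : Char) :
    (if PySem.Chars.isalpha c then
       (if cap then PySem.Chars.upperChar c else PySem.Chars.lowerChar c)
     else c) = (if cap then PySem.Chars.upperChar c else PySem.Chars.lowerChar c) := by
  by_cases h : PySem.Chars.isalpha c = true
  · simp [h]
  · simp only [PySem.Chars.isalpha, Bool.or_eq_true, not_or] at h
    simp [h, PySem.Chars.upperChar, PySem.Chars.lowerChar]

-- the common alternating-case normal form both ports reduce to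
def pvAlt : List Char → Bool → List Char
  | [], _ => []
  | c :: cs, cap =>
      (if cap then PySem.Chars.upperChar c else PySem.Chars.lowerChar c) :: pvAlt cs (!cap)

theorem staggeredLoopA_eq_pvAlt (cs : List Char) :
    ∀ (cap : Bool) (acc : List Char), staggeredLoopA cs cap acc = acc ++ pvAlt cs cap := by
  induction cs with
  | nil => intro cap acc; simp [staggeredLoopA, pvAlt]
  | cons c cs ih =>
      intro cap acc
      rw [staggeredLoopA, ih, pvAlt, pv_step_eq]
      simp

theorem staggeredLoopB_eq_pvAlt (cs : List Char) :
    List.flatten (staggeredLoopB cs) = pvAlt cs true := by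
  induction cs using staggeredLoopB.induct with
  | case1 => simp [staggeredLoopB, pvAlt]
  | case2 c =>
      simp [staggeredLoopB, pvAlt, PySem.Chars.upper, PySem.Chars.lower]
  | case3 c d ds ih =>
      rw [staggeredLoopB, List.flatten_cons, ih]
      simp [pvAlt, PySem.Chars.upper, PySem.Chars.lower]

-- ===== VERDICT (by name: the statement is the Claim_ definition above) =====
theorem staggered_case_spec : Claim_equal_staggered_case := by
  intro sentence _
  unfold Spec_staggered_case staggered_case staggered_case_alt
  rw [staggeredLoopA_eq_pvAlt, staggeredLoopB_eq_pvAlt]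
  simp
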